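-- pv_equiv track=rewrite | github.com/xinnnxuan/CPSC322-FinalProject | mysklearn/myutils.py | extract_header_att_domains
-- ===== SOURCE A (Python) =====
-- def extract_header_att_domains(X_train, y_train, header=None):
--     if header is None:
--         header = ['att' + str(i) for i in range(len(X_train[0]))]
--     attribute_domains = {}
--     for i, val in enumerate(header):
--         if i != -1:
--             col = extract_col(X_train, header, header[i])
--             domain = get_unique_labels(col)
--             attribute_domains[header[i]] = domain
--
--     return header, attribute_domains
--
-- def extract_col(data, col_labels, col_label):
--     """Extract a column with the given label"""
--     col = []
--     if not col_labels is None: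
--         if isinstance(col_label, str):
--             key = col_labels.index(col_label)
--         else:
--             key = col_label
--         for row in data:
--             for i, val in enumerate(row):
--                 col.append(row[key])
--         return col
--     else:
--         key = col_label
--         for row in data:
--             for i, val in enumerate(row):
--                 col.append(row[key])
--         return col
--
-- def get_unique_labels(data):
--     """Returns all unique items in a list"""
--     labels = []
--     for i in data:
--             if i not in labels:
--                 labels.append(i)
--     return labels
-- ===== SOURCE B (Python) =====
-- def extract_header_att_domains(X_train, y_train, header=None):
--     if header is None:
--         header = ['att' + str(i) for i in range(len(X_train[0]))]
--     # distinct names in first-occurrence order, with the first index of each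
--     names = []
--     keys = []
--     for i, name in enumerate(header):
--         if name not in names:
--             names.append(name)
--             keys.append(i)
--     # one pass over the rows, growing every attribute's ordered domain at once
--     domains = [[] for _ in keys]
--     for row in X_train:
--         if row:
--             domains = [d if row[k] in d else d + [row[k]]
--                        for d, k in zip(domains, keys)]
--     return header, dict(zip(names, domains))
-- ===== Notes on version B (the rewrite author's own statement) =====
-- stated objective: faster
-- what changed: A extracts each column separately (appending each row's value once per cell of the row) and dedups the blown-up column per attribute; B computes the first-occurrence index of every distinct header name once, then makes a single pass over the rows growing all ordered domains simultaneously, assembling the dict from the distinct names directly.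
import Mathlib
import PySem

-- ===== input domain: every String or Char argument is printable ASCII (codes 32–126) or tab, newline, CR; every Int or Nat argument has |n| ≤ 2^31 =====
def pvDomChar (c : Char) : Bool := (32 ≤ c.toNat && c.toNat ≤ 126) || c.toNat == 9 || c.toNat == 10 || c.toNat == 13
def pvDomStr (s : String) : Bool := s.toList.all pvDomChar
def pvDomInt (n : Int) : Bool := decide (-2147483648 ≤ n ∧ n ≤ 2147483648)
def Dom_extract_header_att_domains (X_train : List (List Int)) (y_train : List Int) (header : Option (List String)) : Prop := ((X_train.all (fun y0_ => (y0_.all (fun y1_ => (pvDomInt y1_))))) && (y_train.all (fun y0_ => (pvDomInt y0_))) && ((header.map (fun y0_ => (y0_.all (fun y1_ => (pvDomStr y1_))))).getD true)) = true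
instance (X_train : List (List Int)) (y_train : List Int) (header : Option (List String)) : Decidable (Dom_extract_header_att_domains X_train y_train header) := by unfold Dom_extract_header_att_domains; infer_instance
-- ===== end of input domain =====

-- B replaces A's per-attribute column extraction + dedup by one pass over the rows that grows
-- every attribute's ordered domain at once (objective: faster, constant-factor).

-- ===== PORT A =====
-- get_unique_labels: labels loop with "if i not in labels: labels.append(i)"
def pyGetUniqueLabels (data : List Int) : List Int :=
  data.foldl (fun labels i => if i ∈ labels then labels else labels ++ [i]) []

-- extract_col (col_labels is never None here, col_label always a str present in col_labels,
-- so 'key = col_labels.index(col_label)' is (index? …).getD 0; row[key] is pyGetD under Pre_)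
def pyExtractCol (data : List (List Int)) (col_labels : List String) (col_label : String) : List Int :=
  let key : Int := ((PySem.List.index? col_labels col_label).getD 0 : Nat)
  data.foldl (fun col row => row.foldl (fun col _ => col ++ [PySem.List.pyGetD row key 0]) col) []

def extract_header_att_domains (X_train : List (List Int)) (y_train : List Int) (header : Option (List String)) : List String × (List (String × List Int)) :=
  let hdr : List String := match header with
    | none => (PySem.List.pyRange 0 (PySem.List.len (PySem.List.pyGetD X_train 0 [])) 1).map (fun i => "att" ++ PySem.Int.toStr i)
    | some h => h
  let d := (PySem.List.enumerate hdr 0).foldl (fun d p =>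
      if p.1 ≠ -1 then
        PySem.Dict.insert d (PySem.List.pyGetD hdr p.1 "")
          (pyGetUniqueLabels (pyExtractCol X_train hdr (PySem.List.pyGetD hdr p.1 "")))
      else d) PySem.Dict.empty
  (hdr, d.items)

-- ===== PORT B =====
def extract_header_att_domains_alt (X_train : List (List Int)) (y_train : List Int) (header : Option (List String)) : List String × (List (String × List Int)) :=
  let hdr : List String := match header with
    | none => (PySem.List.pyRange 0 (PySem.List.len (PySem.List.pyGetD X_train 0 [])) 1).map (fun i => "att" ++ PySem.Int.toStr i)
    | some h => h
  -- names/keys loop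
  let nk := (PySem.List.enumerate hdr 0).foldl
      (fun (nk : List String × List Int) p =>
        if p.2 ∈ nk.1 then nk else (nk.1 ++ [p.2], nk.2 ++ [p.1])) ([], [])
  -- domains = [[] for _ in keys], then one pass over the rows
  let doms := X_train.foldl (fun doms row =>
      if row = [] then doms
      else (doms.zip nk.2).map (fun dk =>
        if PySem.List.pyGetD row dk.2 0 ∈ dk.1 then dk.1 else dk.1 ++ [PySem.List.pyGetD row dk.2 0]))
    (nk.2.map (fun _ => ([] : List Int)))
  -- dict(zip(names, domains)): names are distinct by construction, so the dict IS the zip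
  (hdr, nk.1.zip doms)

-- ===== PRECONDITION & SPEC =====
-- the effective header (shape helper for Pre_ only; each port inlines its own copy)
def pvHdr (X_train : List (List Int)) (header : Option (List String)) : List String :=
  match header with
  | none => (PySem.List.pyRange 0 (PySem.List.len (PySem.List.pyGetD X_train 0 [])) 1).map (fun i => "att" ++ PySem.Int.toStr i)
  | some h => h

-- Pre_ = exactly the inputs where the Python returns: X_train nonempty when header is None
-- (else len(X_train[0]) raises IndexError), and every nonempty row is long enough for the
-- first-occurrence index of every header name (else row[key] raises IndexError).
def Pre_extract_header_att_domains (X_train : List (List Int)) (y_train : List Int) (header : Option (List String)) : Prop :=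
  (header = none → X_train ≠ []) ∧
  ∀ s ∈ pvHdr X_train header, ∀ row ∈ X_train, row ≠ [] →
    ((PySem.List.index? (pvHdr X_train header) s).getD 0) < row.length
instance (X_train : List (List Int)) (y_train : List Int) (header : Option (List String)) : Decidable (Pre_extract_header_att_domains X_train y_train header) := by unfold Pre_extract_header_att_domains; infer_instance

def pvWitness_extract_header_att_domains : List (List Int) × List Int × Option (List String) :=
  ([[1, 2], [1, 3], [2, 2]], [0, 1, 0], some ["a", "b"])

def Spec_extract_header_att_domains (X_train : List (List Int)) (y_train : List Int) (header : Option (List String)) (out : List String × (List (String × List Int))) : Prop := out = extract_header_att_domains_alt X_train y_train header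
instance (X_train : List (List Int)) (y_train : List Int) (header : Option (List String)) (out : List String × (List (String × List Int))) : Decidable (Spec_extract_header_att_domains X_train y_train header out) := by unfold Spec_extract_header_att_domains; infer_instance

-- ===== CLAIM (what is proved, stated in full; the proofs are below) =====
def Claim_equal_extract_header_att_domains : Prop := ∀ (X_train : List (List Int)) (y_train : List Int) (header : Option (List String)), Dom_extract_header_att_domains X_train y_train header → Pre_extract_header_att_domains X_train y_train header → Spec_extract_header_att_domains X_train y_train header (extract_header_att_domains X_train y_train header)

-- ===== LEMMAS AND PROOFS =====

-- A's one-attribute result: dedup of the (blown-up) extracted column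
def pvF (X_train : List (List Int)) (hdr : List String) (s : String) : List Int :=
  pyGetUniqueLabels (pyExtractCol X_train hdr s)

-- the first-occurrence index of a header name, as the Int both ports index rows with
def pvKey (hdr : List String) (s : String) : Int :=
  ((PySem.List.index? hdr s).getD 0 : Nat)

-- B's one-attribute result: single pass over the rows
def pvD (X_train : List (List Int)) (k : Int) : List Int :=
  X_train.foldl (fun d row => if row = [] then d
    else if PySem.List.pyGetD row k 0 ∈ d then d else d ++ [PySem.List.pyGetD row k 0]) []

theorem map_zip_self {α β : Type} (g : α → β) :
    ∀ l : List α, (l.map g).zip l = l.map (fun a => (g a, a)) := by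
  intro l; induction l with
  | nil => rfl
  | cons x t ih => simp [ih]

theorem zip_map_self {α β : Type} (g : α → β) :
    ∀ l : List α, l.zip (l.map g) = l.map (fun a => (a, g a)) := by
  intro l; induction l with
  | nil => rfl
  | cons x t ih => simp [ih]

-- the 'if i != -1' guard is always true and header[i] = the enumerated element
theorem foldl_enum_getD {β : Type} (g : β → String → β) :
    ∀ (l pre : List String) (b : β),
    (PySem.List.enumerate l (pre.length : Int)).foldl
        (fun b p => if p.1 ≠ -1 then g b (PySem.List.pyGetD (pre ++ l) p.1 "") else b) b
      = l.foldl g b := by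
  intro l
  induction l with
  | nil => intro pre b; simp [PySem.List.enumerate]
  | cons x t ih =>
    intro pre b
    rw [PySem.List.enumerate_cons]
    simp only [List.foldl_cons]
    have hguard : ((pre.length : Int) ≠ -1) := by omega
    rw [if_pos hguard]
    have hget : PySem.List.pyGetD (pre ++ x :: t) (pre.length : Int) "" = x := by
      simp [PySem.List.pyGetD]
    rw [hget]
    have hpre : ((pre.length : Int) + 1) = (((pre ++ [x]).length : Int)) := by simp
    rw [hpre]
    have hl : pre ++ x :: t = (pre ++ [x]) ++ t := by simp
    rw [hl]
    exact ih (pre ++ [x]) (g b x)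

-- folding 'insert s (F s)' over a list of names yields first-occurrence items
theorem items_fold_ins (F : String → List Int) :
    ∀ (l : List String),
    (l.foldl (fun d s => PySem.Dict.insert d s (F s)) PySem.Dict.empty).items
      = (PySem.Set.ofList l).map (fun s => (s, F s)) := by
  intro l
  induction l using List.reverseRecOn with
  | nil => rfl
  | append_singleton t x ih =>
    rw [List.foldl_append, List.foldl_cons, List.foldl_nil]
    set d := t.foldl (fun d s => PySem.Dict.insert d s (F s)) PySem.Dict.empty with hd
    have hkeys : d.keys = PySem.Set.ofList t := by
      show d.items.map (·.1) = _
      rw [ih, List.map_map,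
        show ((fun x : String × List Int => x.1) ∘ fun s => (s, F s)) = id from rfl,
        List.map_id]
    by_cases hx : x ∈ t
    · have hc : d.contains x = true := by
        rw [PySem.Dict.contains_iff_mem_keys, hkeys]
        exact (PySem.Set.mem_ofList ..).mpr hx
      rw [PySem.Dict.items_insert_of_contains d (F x) hc, ih]
      rw [PySem.Set.ofList_append_singleton,
        PySem.Set.add_of_mem ((PySem.Set.mem_ofList ..).mpr hx)]
      rw [List.map_map]
      refine List.map_congr_left ?_
      intro s _
      by_cases hsx : s = x
      · subst hsx
        rw [Function.comp_apply, if_pos (by simp)]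
      · simp [hsx]
    · have hc : d.contains x = false := by
        rw [Bool.eq_false_iff]
        intro hcon
        exact hx ((PySem.Set.mem_ofList ..).mp (hkeys ▸ (PySem.Dict.contains_iff_mem_keys d x).mp hcon))
      rw [PySem.Dict.items_insert_of_not_contains d (F x) hc, ih]
      rw [PySem.Set.ofList_append_singleton,
        PySem.Set.add_of_not_mem (fun h => hx ((PySem.Set.mem_ofList ..).mp h))]
      simp

-- B's names/keys loop: distinct names in order, paired with their first indices
theorem nk_fold :
    ∀ (l : List String),
    (PySem.List.enumerate l 0).foldl
        (fun (nk : List String × List Int) p =>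
          if p.2 ∈ nk.1 then nk else (nk.1 ++ [p.2], nk.2 ++ [p.1])) ([], [])
      = (PySem.Set.ofList l, (PySem.Set.ofList l).map (pvKey l)) := by
  intro l
  induction l using List.reverseRecOn with
  | nil => rfl
  | append_singleton t x ih =>
    rw [PySem.List.enumerate_append, List.foldl_append, ih]
    rw [PySem.List.enumerate_cons]
    simp only [List.foldl_cons]
    by_cases hx : x ∈ t
    · have hmem : x ∈ PySem.Set.ofList t := (PySem.Set.mem_ofList ..).mpr hx
      rw [if_pos hmem]
      rw [PySem.Set.ofList_append_singleton, PySem.Set.add_of_mem hmem]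
      refine Prod.ext rfl ?_
      refine List.map_congr_left ?_
      intro s hs
      show pvKey t s = pvKey (t ++ [x]) s
      unfold pvKey
      rw [PySem.List.index?_append_of_mem [x] ((PySem.Set.mem_ofList ..).mp hs)]
    · have hmem : x ∉ PySem.Set.ofList t := fun h => hx ((PySem.Set.mem_ofList ..).mp h)
      rw [if_neg hmem]
      rw [PySem.Set.ofList_append_singleton, PySem.Set.add_of_not_mem hmem]
      refine Prod.ext rfl ?_
      show _ ++ [(0 : Int) + (t.length : Int)] = _
      rw [List.map_append]
      congr 1
      · refine List.map_congr_left ?_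
        intro s hs
        show pvKey t s = pvKey (t ++ [x]) s
        unfold pvKey
        rw [PySem.List.index?_append_of_mem [x] ((PySem.Set.mem_ofList ..).mp hs)]
      · show [(0 : Int) + (t.length : Int)] = [pvKey (t ++ [x]) x]
        unfold pvKey
        rw [PySem.List.index?_append_singleton_self t x hx]
        simp

-- B's row pass commutes with the per-key decomposition
theorem doms_fold (keys : List Int) :
    ∀ (X : List (List Int)) (g : Int → List Int),
    X.foldl (fun doms row => if row = [] then doms
        else (doms.zip keys).map (fun dk =>
          if PySem.List.pyGetD row dk.2 0 ∈ dk.1 then dk.1 else dk.1 ++ [PySem.List.pyGetD row dk.2 0]))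
      (keys.map g)
      = keys.map (fun k => X.foldl (fun d row => if row = [] then d
          else if PySem.List.pyGetD row k 0 ∈ d then d else d ++ [PySem.List.pyGetD row k 0]) (g k)) := by
  intro X
  induction X with
  | nil => intro g; simp
  | cons row X ih =>
    intro g
    simp only [List.foldl_cons]
    by_cases hrow : row = []
    · rw [if_pos hrow, ih g]
      refine List.map_congr_left ?_
      intro k _
      rw [if_pos hrow]
    · rw [if_neg hrow]
      rw [map_zip_self g keys, List.map_map]
      have hbody : ((fun dk : List Int × Int =>
            if PySem.List.pyGetD row dk.2 0 ∈ dk.1 then dk.1 else dk.1 ++ [PySem.List.pyGetD row dk.2 0])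
          ∘ fun k => (g k, k))
          = fun k => if PySem.List.pyGetD row k 0 ∈ g k then g k else g k ++ [PySem.List.pyGetD row k 0] := rfl
      rw [hbody, ih]
      refine List.map_congr_left ?_
      intro k _
      rw [if_neg hrow]

-- extract_col materialises row[key] once per cell of the row
theorem extractCol_eq (X : List (List Int)) (hdr : List String) (s : String) :
    pyExtractCol X hdr s
      = X.flatMap (fun row => List.replicate row.length (PySem.List.pyGetD row (pvKey hdr s) 0)) := by
  show X.foldl (fun col row => row.foldl
      (fun col _ => col ++ [PySem.List.pyGetD row (pvKey hdr s) 0]) col) [] = _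
  have hin : (fun (col : List Int) (row : List Int) => row.foldl
      (fun col _ => col ++ [PySem.List.pyGetD row (pvKey hdr s) 0]) col)
      = fun col row => col ++ List.replicate row.length (PySem.List.pyGetD row (pvKey hdr s) 0) := by
    funext col row
    rw [PySem.List.foldl_append_singleton_eq_map]
    simp [List.map_const']
  rw [hin, PySem.List.foldl_append_eq_flatMap]
  simp

theorem uniq_rep :
    ∀ (n : Nat) (s : List Int) (x : Int),
    (List.replicate n x).foldl (fun labels i => if i ∈ labels then labels else labels ++ [i]) s
      = if n = 0 then s else (if x ∈ s then s else s ++ [x]) := by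
  intro n
  induction n with
  | zero => intro s x; simp
  | succ m ih =>
    intro s x
    rw [List.replicate_succ, List.foldl_cons, ih]
    by_cases hm : m = 0
    · simp [hm]
    · rw [if_neg hm, if_neg (Nat.succ_ne_zero m)]
      by_cases hx : x ∈ s
      · rw [if_pos hx, if_pos hx]
      · rw [if_neg hx, if_pos (by simp)]

-- dedup of the blown-up column = one conditional append per nonempty row
theorem uniq_flatMap (v : List Int → Int) :
    ∀ (X : List (List Int)) (s : List Int),
    (X.flatMap (fun row => List.replicate row.length (v row))).foldl
        (fun labels i => if i ∈ labels then labels else labels ++ [i]) s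
      = X.foldl (fun d row => if row = [] then d
          else if v row ∈ d then d else d ++ [v row]) s := by
  intro X
  induction X with
  | nil => intro s; simp
  | cons row t ih =>
    intro s
    rw [List.flatMap_cons, List.foldl_append, uniq_rep, ih, List.foldl_cons]
    congr 1
    by_cases hrow : row = []
    · rw [if_pos (by simp [hrow]), if_pos hrow]
    · rw [if_neg (by simpa using hrow), if_neg hrow]

-- per-attribute agreement: A's column-then-dedup equals B's single pass
theorem F_eq_D (X : List (List Int)) (hdr : List String) (s : String) :
    pvF X hdr s = pvD X (pvKey hdr s) := by
  unfold pvF pvD pyGetUniqueLabels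
  rw [extractCol_eq]
  exact uniq_flatMap (fun row => PySem.List.pyGetD row (pvKey hdr s) 0) X []

-- the whole second component agrees, for any effective header
theorem core (X : List (List Int)) (hdr : List String) :
    ((PySem.List.enumerate hdr 0).foldl (fun d p =>
        if p.1 ≠ -1 then
          PySem.Dict.insert d (PySem.List.pyGetD hdr p.1 "")
            (pyGetUniqueLabels (pyExtractCol X hdr (PySem.List.pyGetD hdr p.1 "")))
        else d) PySem.Dict.empty).items
      = (let nk := (PySem.List.enumerate hdr 0).foldl
            (fun (nk : List String × List Int) p =>
              if p.2 ∈ nk.1 then nk else (nk.1 ++ [p.2], nk.2 ++ [p.1])) ([], []);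
         nk.1.zip (X.foldl (fun doms row =>
            if row = [] then doms
            else (doms.zip nk.2).map (fun dk =>
              if PySem.List.pyGetD row dk.2 0 ∈ dk.1 then dk.1 else dk.1 ++ [PySem.List.pyGetD row dk.2 0]))
          (nk.2.map (fun _ => ([] : List Int))))) := by
  have hA : (PySem.List.enumerate hdr 0).foldl (fun d p =>
        if p.1 ≠ -1 then
          PySem.Dict.insert d (PySem.List.pyGetD hdr p.1 "")
            (pyGetUniqueLabels (pyExtractCol X hdr (PySem.List.pyGetD hdr p.1 "")))
        else d) PySem.Dict.empty
      = hdr.foldl (fun d s => PySem.Dict.insert d s (pvF X hdr s)) PySem.Dict.empty := by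
    have := foldl_enum_getD
      (g := fun d s => PySem.Dict.insert d s (pvF X hdr s)) hdr [] PySem.Dict.empty
    simpa [pvF] using this
  rw [hA, items_fold_ins (pvF X hdr)]
  simp only [nk_fold hdr]
  rw [doms_fold ((PySem.Set.ofList hdr).map (pvKey hdr)) X (fun _ => ([] : List Int)),
    List.map_map, zip_map_self]
  refine List.map_congr_left ?_
  intro s _
  exact congrArg _ (F_eq_D X hdr s)

-- ===== VERDICT (by name: the statement is the Claim_ definition above) =====
theorem extract_header_att_domains_spec : Claim_equal_extract_header_att_domains := by
  intro X y header _ _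
  unfold Spec_extract_header_att_domains
  unfold extract_header_att_domains extract_header_att_domains_alt
  cases header with
  | none =>
    exact congrArg _ (core X _)
  | some h =>
    exact congrArg _ (core X h)
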